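-- pv_equiv track=rewrite | github.com/cmlzaGk/TopCoder | ABBA.py | canObtain
-- ===== SOURCE A (Python) =====
-- def canObtain(initial, target):
--     isReversed = False
--     start = 0
--     end = len(target) - 1
--     while len(initial) < (end - start + 1):
--         currentTail = target[start] if isReversed else target[end]
--         if isReversed:
--             start += 1
--         else:
--             end -= 1
--         if currentTail == "B":
--             isReversed = not isReversed
--     matchString = initial[::-1] if isReversed else initial
--     if matchString == target[start:end+1]:
--         return "Possible"
--     return "Impossible"
-- ===== SOURCE B (Python) =====
-- def canObtain(initial, target):
--     # Peel the last char of target until lengths match, physically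
--     # reversing the remainder whenever a 'B' is removed.
--     while len(initial) < len(target):
--         if target[-1] == "B":
--             target = target[:-1][::-1]
--         else:
--             target = target[:-1]
--     return "Possible" if target == initial else "Impossible"
-- ===== Notes on version B (the rewrite author's own statement) =====
-- stated objective: simpler
-- what changed: B drops A's two-pointer-plus-isReversed-flag state entirely and instead physically maintains the remaining target string, truncating it by one and reversing it whenever a 'B' is peeled, finishing with a direct string comparison against initial.
import Mathlib
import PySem

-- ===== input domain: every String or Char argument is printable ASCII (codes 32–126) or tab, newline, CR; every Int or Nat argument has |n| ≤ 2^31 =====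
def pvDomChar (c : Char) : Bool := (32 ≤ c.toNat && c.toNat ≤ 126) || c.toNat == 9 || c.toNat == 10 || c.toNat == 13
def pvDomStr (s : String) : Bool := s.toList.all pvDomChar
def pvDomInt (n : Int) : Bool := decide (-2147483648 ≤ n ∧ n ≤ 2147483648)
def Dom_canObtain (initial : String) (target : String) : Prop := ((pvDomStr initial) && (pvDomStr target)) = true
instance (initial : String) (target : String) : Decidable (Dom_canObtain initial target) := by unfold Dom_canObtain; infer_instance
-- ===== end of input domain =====

-- B replaces A's two-pointer + isReversed-flag scan by physically maintaining the remaining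
-- string, reversing it whenever a 'B' is peeled; objective: simpler (same O(n) peels, no flag).

-- ===== PORT A =====
-- A's while loop: state (isReversed, start, end); runs while len(initial) < end - start + 1.
-- fuel = len(target) bounds the iteration count (each pass shrinks end - start + 1 by one,
-- which starts at len(target)), so the fuel never runs out: a totality guard only.
-- target[start] / target[end] are ported with pyGet?; inside the loop the index is provably
-- in range (start ≤ end since the slice is longer than len(initial) ≥ 0), so .getD ' ' is
-- never the none case where Python would raise — A is total.
def canObtainLoop (lenInit : Nat) (t : List Char) (fuel : Nat) (isRev : Bool) (s e : Int) :
    Bool × Int × Int :=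
  match fuel with
  | 0 => (isRev, s, e)
  | fuel + 1 =>
    if (lenInit : Int) < e - s + 1 then
      let currentTail := (PySem.List.pyGet? t (if isRev then s else e)).getD ' '
      let s' := if isRev then s + 1 else s
      let e' := if isRev then e else e - 1
      let isRev' := if currentTail = 'B' then !isRev else isRev
      canObtainLoop lenInit t fuel isRev' s' e'
    else (isRev, s, e)

def canObtain (initial : String) (target : String) : String :=
  let tl := target.toList
  let (isRev, s, e) := canObtainLoop initial.toList.length tl tl.length false 0 ((tl.length : Int) - 1)
  let matchString := if isRev then initial.toList.reverse else initial.toList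
  if matchString = PySem.List.slice tl (some s) (some (e + 1)) then "Possible" else "Impossible"

-- ===== PORT B =====
-- Source B's loop: while len(initial) < len(target): peel target[-1], reversing the rest on 'B'.
-- (fuel = len(target) bounds the iteration count; each pass shortens target by one.)
def canObtainAltLoop (lenInit : Nat) (fuel : Nat) (t : List Char) : List Char :=
  match fuel with
  | 0 => t
  | fuel + 1 =>
    if lenInit < t.length then
      let last := (PySem.List.pyGet? t (-1)).getD ' '
      let t' := PySem.List.slice t none (some (-1))    -- target[:-1]
      canObtainAltLoop lenInit fuel (if last = 'B' then t'.reverse else t')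
    else t

def canObtain_alt (initial : String) (target : String) : String :=
  if canObtainAltLoop initial.toList.length target.toList.length target.toList = initial.toList
  then "Possible" else "Impossible"

-- ===== PRECONDITION & SPEC =====
def Spec_canObtain (initial : String) (target : String) (out : String) : Prop := out = canObtain_alt initial target
instance (initial : String) (target : String) (out : String) : Decidable (Spec_canObtain initial target out) := by unfold Spec_canObtain; infer_instance

-- ===== CLAIM (what is proved, stated in full; the proofs are below) =====
def Claim_equal_canObtain : Prop := ∀ (initial : String) (target : String), Dom_canObtain initial target → Spec_canObtain initial target (canObtain initial target)

-- ===== LEMMAS AND PROOFS =====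

-- The string B's loop maintains, expressed in A's state: the slice t[s:e+1], reversed iff isRev.
-- (proof-only helper)
def logi (t : List Char) (isRev : Bool) (s e : Int) : List Char :=
  let sl := PySem.List.slice t (some s) (some (e + 1))
  if isRev then sl.reverse else sl

theorem take_drop_getLast (t : List Char) (a m : Nat) (hm : 0 < m) (ham : a + m ≤ t.length) :
    ((t.drop a).take m).getLast? = t[a + m - 1]? := by
  rw [List.getLast?_take, if_neg (by omega)]
  rw [show (t.drop a)[m-1]? = t[a + (m-1)]? from List.getElem?_drop]
  rw [List.getElem?_eq_getElem (by omega), Option.some_or,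
      List.getElem?_eq_getElem (by omega : a + m - 1 < t.length)]
  simp only [Option.some.injEq]
  congr 1
  omega

theorem take_succ_dropLast (l : List Char) (b : Nat) (h : b + 1 ≤ l.length) :
    (l.take (b + 1)).dropLast = l.take b := by
  rcases Nat.lt_or_ge (b + 1) l.length with h' | h'
  · exact List.dropLast_take h'
  · rw [List.take_of_length_le (by omega), List.dropLast_eq_take,
        show l.length - 1 = b by omega]

theorem loops_agree (L : Nat) (t : List Char) (f : Nat) (isRev : Bool) (s e : Int)
    (hs : 0 ≤ s) (hse : s ≤ e + 1) (he : e < (t.length : Int)) :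
    canObtainAltLoop L f (logi t isRev s e) =
      (fun st => logi t st.1 st.2.1 st.2.2) (canObtainLoop L t f isRev s e) := by
  induction f generalizing isRev s e with
  | zero => rfl
  | succ f ih =>
    have hsl : PySem.List.slice t (some s) (some (e + 1))
        = (t.drop s.toNat).take ((e + 1).toNat - s.toNat) := PySem.List.slice_toNat t hs (by omega)
    set a := s.toNat with ha
    set m := (e + 1).toNat - s.toNat with hm
    have ham : a + m ≤ t.length := by omega
    have hlenlogi : (logi t isRev s e).length = m := by
      unfold logi
      cases isRev <;> simp [hsl] <;> omega
    rw [canObtainLoop, canObtainAltLoop]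
    by_cases hcond : (L : Int) < e - s + 1
    · have hm1 : 0 < m := by omega
      have hLm : L < (logi t isRev s e).length := by rw [hlenlogi]; omega
      rw [if_pos hcond, if_pos hLm]
      simp only []
      -- the peeled characters agree
      have hchar : (PySem.List.pyGet? (logi t isRev s e) (-1)).getD ' '
          = (PySem.List.pyGet? t (if isRev then s else e)).getD ' ' := by
        cases isRev with
        | false =>
          have hg : logi t false s e = (t.drop a).take m := by unfold logi; simp [hsl]
          rw [hg, PySem.List.pyGet?_neg_one, take_drop_getLast t a m hm1 ham,
              if_neg (by simp : ¬ (false = true)),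
              PySem.List.pyGet?_of_nonneg t (show (0:Int) ≤ e by omega),
              show a + m - 1 = e.toNat by omega]
        | true =>
          have hg : logi t true s e = ((t.drop a).take m).reverse := by unfold logi; simp [hsl]
          rw [hg, PySem.List.pyGet?_neg_one, List.getLast?_reverse, List.head?_take,
              if_neg (by omega), List.head?_drop, if_pos rfl,
              PySem.List.pyGet?_of_nonneg t hs]
      rw [hchar]
      -- the peeled string equals logi of A's next state
      have hstep : (if (PySem.List.pyGet? t (if isRev then s else e)).getD ' ' = 'B'
            then (PySem.List.slice (logi t isRev s e) none (some (-1))).reverse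
            else PySem.List.slice (logi t isRev s e) none (some (-1)))
          = logi t (if (PySem.List.pyGet? t (if isRev then s else e)).getD ' ' = 'B'
                    then !isRev else isRev)
                   (if isRev then s + 1 else s) (if isRev then e else e - 1) := by
        rw [PySem.List.slice_to_neg_one]
        cases isRev with
        | false =>
          have hg : logi t false s e = (t.drop a).take m := by unfold logi; simp [hsl]
          have hdl : (logi t false s e).dropLast = (t.drop a).take (m - 1) := by
            rw [hg, show m = (m - 1) + 1 by omega]
            exact take_succ_dropLast _ _ (by simp; omega)
          have hnew : PySem.List.slice t (some s) (some e)
              = (t.drop a).take (m - 1) := by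
            rw [PySem.List.slice_toNat t hs (by omega : (0:Int) ≤ e), ← ha]
            congr 1
            omega
          have hR0 : logi t false s (e - 1) = (t.drop a).take (m - 1) := by
            unfold logi; simp [hnew]
          have hR1 : logi t true s (e - 1) = ((t.drop a).take (m - 1)).reverse := by
            unfold logi; simp [hnew]
          by_cases hB : (PySem.List.pyGet? t e).getD ' ' = 'B' <;>
            simp [hB, hdl, hR0, hR1]
        | true =>
          have hg : logi t true s e = ((t.drop a).take m).reverse := by unfold logi; simp [hsl]
          have hdl : (logi t true s e).dropLast = ((t.drop (a + 1)).take (m - 1)).reverse := by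
            rw [hg, List.dropLast_reverse]
            congr 1
            rw [← List.drop_one, List.drop_take, List.drop_drop]
          have hnew : PySem.List.slice t (some (s + 1)) (some (e + 1))
              = (t.drop (a + 1)).take (m - 1) := by
            rw [PySem.List.slice_toNat t (by omega : (0:Int) ≤ s + 1) (by omega : (0:Int) ≤ e + 1),
                show (s + 1).toNat = a + 1 by omega]
            congr 1
          have hR0 : logi t false (s + 1) e = (t.drop (a + 1)).take (m - 1) := by
            unfold logi; simp [hnew]
          have hR1 : logi t true (s + 1) e = ((t.drop (a + 1)).take (m - 1)).reverse := by
            unfold logi; simp [hnew]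
          by_cases hB : (PySem.List.pyGet? t s).getD ' ' = 'B' <;>
            simp [hB, hdl, hR0, hR1]
      rw [hstep]
      apply ih
      all_goals cases isRev <;> simp <;> omega
    · have hLm : ¬ (L < (logi t isRev s e).length) := by rw [hlenlogi]; omega
      rw [if_neg hcond, if_neg hLm]

-- ===== VERDICT (by name: the statement is the Claim_ definition above) =====
theorem canObtain_spec : Claim_equal_canObtain := by
  intro initial target _
  unfold Spec_canObtain canObtain canObtain_alt
  have h0 : logi target.toList false 0 ((target.toList.length : Int) - 1) = target.toList := by
    unfold logi
    rw [show ((target.toList.length : Int) - 1) + 1 = (target.toList.length : Int) by ring]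
    rw [PySem.List.slice_zero_start,
        PySem.List.slice_to target.toList (by omega : (0:Int) ≤ (target.toList.length : Int))]
    simp
  have hloops := loops_agree initial.toList.length target.toList target.toList.length false 0
      ((target.toList.length : Int) - 1) (by omega) (by omega) (by omega)
  rw [h0] at hloops
  rcases hA : canObtainLoop initial.toList.length target.toList target.toList.length false 0
      ((target.toList.length : Int) - 1) with ⟨isRev, s, e⟩
  rw [hA] at hloops
  simp only [] at hloops
  simp only [hA]
  rw [hloops]
  cases isRev with
  | false =>
    refine if_congr ?_ rfl rfl
    unfold logi
    simp only [Bool.false_eq_true, if_false]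
    exact eq_comm
  | true =>
    refine if_congr ?_ rfl rfl
    unfold logi
    constructor <;> intro h <;> simp [← h]
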